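-- pv_equiv track=rewrite | github.com/yashpal2104/agent-hacks-serverless-ai-agent | celebrity_companion_ai_clean.py | select_optimal_celebrity
-- ===== SOURCE A (Python) =====
-- def select_optimal_celebrity(user_input: str) -> str:
--     """Simple celebrity selection based on user input analysis"""
--     user_lower = user_input.lower()
--
--     # Simple emotion/topic detection for celebrity selection
--     if any(word in user_lower for word in ["stress", "anxious", "worried", "overwhelm"]):
--         return "david"  # Calming nature wisdom
--     elif any(word in user_lower for word in ["sad", "lonely", "grief", "confused"]):
--         return "morgan"  # Deep wisdom and comfort
--     elif any(word in user_lower for word in ["angry", "frustrated", "relationship"]):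
--         return "scarlett"  # Emotional intelligence
--     else:
--         return "peter"  # Default to humor and relatability
-- ===== SOURCE B (Python) =====
-- # One left-to-right scan of the text: at each position try every keyword as a
-- # prefix, keeping the lowest-rank (highest-priority) hit seen; the keyword's
-- # rank/name ride along in a flat table, so no per-category substring passes.
-- KEYWORD_TABLE = [
--     ("stress", 0, "david"), ("anxious", 0, "david"),
--     ("worried", 0, "david"), ("overwhelm", 0, "david"),
--     ("sad", 1, "morgan"), ("lonely", 1, "morgan"),
--     ("grief", 1, "morgan"), ("confused", 1, "morgan"),
--     ("angry", 2, "scarlett"), ("frustrated", 2, "scarlett"),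
--     ("relationship", 2, "scarlett"),
-- ]
--
-- def select_optimal_celebrity(user_input: str) -> str:
--     """Single-pass position scan with a running best-priority match."""
--     s = user_input.lower()
--     best_rank, best_name = 3, "peter"
--     for i in range(len(s)):
--         for kw, rank, name in KEYWORD_TABLE:
--             if rank < best_rank and s.startswith(kw, i):
--                 best_rank, best_name = rank, name
--     return best_name
-- ===== Notes on version B (the rewrite author's own statement) =====
-- stated objective: alternative
-- what changed: Instead of testing each category's keywords as substrings in an if/elif chain, B makes a single left-to-right scan over the text, trying every keyword as a prefix at each position and keeping the lowest-rank hit from a flat (keyword, rank, name) table.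
import Mathlib
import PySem

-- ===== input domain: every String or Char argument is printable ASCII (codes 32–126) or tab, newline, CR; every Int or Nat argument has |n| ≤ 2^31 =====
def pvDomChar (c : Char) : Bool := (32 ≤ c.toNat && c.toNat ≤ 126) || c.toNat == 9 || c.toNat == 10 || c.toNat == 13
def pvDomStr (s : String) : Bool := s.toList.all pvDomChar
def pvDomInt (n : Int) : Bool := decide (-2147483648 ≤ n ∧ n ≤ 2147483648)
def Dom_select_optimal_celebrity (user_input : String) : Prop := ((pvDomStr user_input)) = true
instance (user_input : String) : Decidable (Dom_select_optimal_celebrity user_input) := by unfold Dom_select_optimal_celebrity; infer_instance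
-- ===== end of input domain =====

-- B replaces A's per-category substring chain by a single position scan with a
-- flat (keyword, rank, name) table keeping the lowest-rank prefix hit (alternative, same cost).

-- ===== PORT A =====
def select_optimal_celebrity (user_input : String) : String :=
  let user_lower := PySem.Str.lower user_input
  if ["stress", "anxious", "worried", "overwhelm"].any (fun word => PySem.Str.isIn word user_lower) then
    "david"
  else if ["sad", "lonely", "grief", "confused"].any (fun word => PySem.Str.isIn word user_lower) then
    "morgan"
  else if ["angry", "frustrated", "relationship"].any (fun word => PySem.Str.isIn word user_lower) then
    "scarlett"
  else
    "peter"

-- ===== PORT B =====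
def KEYWORD_TABLE : List (String × Nat × String) :=
  [("stress", 0, "david"), ("anxious", 0, "david"),
   ("worried", 0, "david"), ("overwhelm", 0, "david"),
   ("sad", 1, "morgan"), ("lonely", 1, "morgan"),
   ("grief", 1, "morgan"), ("confused", 1, "morgan"),
   ("angry", 2, "scarlett"), ("frustrated", 2, "scarlett"),
   ("relationship", 2, "scarlett")]

-- Python's s.startswith(kw, i): for the 0 ≤ i < len(s) produced by range(len(s))
-- this is exactly "kw is a prefix of s[i:]" (so .toNat is exact here).
def pvStartsAt (t : List Char) (i : Int) (kw : String) : Bool :=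
  List.isPrefixOf kw.toList (t.drop i.toNat)

def select_optimal_celebrity_alt (user_input : String) : String :=
  let t := (PySem.Str.lower user_input).toList
  let best := (PySem.List.pyRange 0 (t.length : Int) 1).foldl
    (fun (b : Nat × String) i =>
      KEYWORD_TABLE.foldl
        (fun (b : Nat × String) e =>
          if e.2.1 < b.1 ∧ pvStartsAt t i e.1 = true then (e.2.1, e.2.2) else b) b)
    (3, "peter")
  best.2

-- ===== PRECONDITION & SPEC =====
def Spec_select_optimal_celebrity (user_input : String) (out : String) : Prop := out = select_optimal_celebrity_alt user_input
instance (user_input : String) (out : String) : Decidable (Spec_select_optimal_celebrity user_input out) := by unfold Spec_select_optimal_celebrity; infer_instance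

-- ===== CLAIM (what is proved, stated in full; the proofs are below) =====
def Claim_equal_select_optimal_celebrity : Prop := ∀ (user_input : String), Dom_select_optimal_celebrity user_input → Spec_select_optimal_celebrity user_input (select_optimal_celebrity user_input)

-- ===== LEMMAS AND PROOFS =====

-- canonical (rank, name) states of B's loop
def pvC (b : Nat) : Nat × String :=
  (min b 3, if b = 0 then "david" else if b = 1 then "morgan" else if b = 2 then "scarlett" else "peter")

-- the pair fold is the numeric (min-rank) fold, carried through pvC
theorem pv_pair_fold (p : String × Nat × String → Bool) :
    ∀ (L : List (String × Nat × String)), (∀ e ∈ L, (e.2.1, e.2.2) = pvC e.2.1) →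
    ∀ b : Nat, b ≤ 3 →
    L.foldl (fun (a : Nat × String) e => if e.2.1 < a.1 ∧ p e = true then (e.2.1, e.2.2) else a) (pvC b)
      = pvC (L.foldl (fun (a : Nat) e => if p e then min a e.2.1 else a) b) := by
  intro L
  induction L with
  | nil => intro _ b _; rfl
  | cons e L ih =>
    intro hcan b hb
    have hb1 : (pvC b).1 = b := by simp [pvC]; omega
    simp only [List.foldl_cons, hb1]
    by_cases hp : p e = true
    · by_cases hlt : e.2.1 < b
      · have : (if e.2.1 < b ∧ p e = true then (e.2.1, e.2.2) else pvC b) = pvC e.2.1 := by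
          rw [if_pos ⟨hlt, hp⟩]; exact hcan e (List.mem_cons_self ..)
        rw [this, if_pos hp]
        have : min b e.2.1 = e.2.1 := by omega
        rw [this]
        exact ih (fun x hx => hcan x (List.mem_cons_of_mem _ hx)) _ (by
          have h2 := hcan e (List.mem_cons_self ..)
          have : (pvC e.2.1).1 = e.2.1 := by rw [← h2]
          simp [pvC] at this; omega)
      · have h1 : (if e.2.1 < b ∧ p e = true then (e.2.1, e.2.2) else pvC b) = pvC b := by
          rw [if_neg]; rintro ⟨h, _⟩; exact hlt h
        have h2 : (if p e then min b e.2.1 else b) = b := by rw [if_pos hp]; omega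
        rw [h1, h2]
        exact ih (fun x hx => hcan x (List.mem_cons_of_mem _ hx)) _ hb
    · have h1 : (if e.2.1 < b ∧ p e = true then (e.2.1, e.2.2) else pvC b) = pvC b := by
        rw [if_neg]; rintro ⟨_, h⟩; exact hp h
      rw [h1, if_neg hp]
      exact ih (fun x hx => hcan x (List.mem_cons_of_mem _ hx)) _ hb

-- ≤-characterisation of the inner min fold
theorem pv_inner_le (p : String × Nat × String → Bool) :
    ∀ (L : List (String × Nat × String)) (b r : Nat),
    L.foldl (fun (a : Nat) e => if p e then min a e.2.1 else a) b ≤ r ↔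
      b ≤ r ∨ ∃ e ∈ L, p e = true ∧ e.2.1 ≤ r := by
  intro L
  induction L with
  | nil => simp
  | cons e L ih =>
    intro b r
    simp only [List.foldl_cons]
    rw [ih]
    by_cases hp : p e = true
    · rw [if_pos hp]
      constructor
      · rintro (h | h)
        · by_cases hble : b ≤ r
          · exact Or.inl hble
          · exact Or.inr ⟨e, List.mem_cons_self .., hp, by omega⟩
        · rcases h with ⟨x, hx, hpx, hr⟩; exact Or.inr ⟨x, List.mem_cons_of_mem _ hx, hpx, hr⟩
      · rintro (h | ⟨x, hx, hpx, hr⟩)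
        · exact Or.inl (by omega)
        · rcases List.mem_cons.mp hx with rfl | hx
          · exact Or.inl (by omega)
          · exact Or.inr ⟨x, hx, hpx, hr⟩
    · rw [if_neg hp]
      constructor
      · rintro (h | ⟨x, hx, hpx, hr⟩)
        · exact Or.inl h
        · exact Or.inr ⟨x, List.mem_cons_of_mem _ hx, hpx, hr⟩
      · rintro (h | ⟨x, hx, hpx, hr⟩)
        · exact Or.inl h
        · rcases List.mem_cons.mp hx with rfl | hx
          · exact (hp hpx).elim
          · exact Or.inr ⟨x, hx, hpx, hr⟩

-- ≤-characterisation of the full numeric double fold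
theorem pv_outer_le (t : List Char) :
    ∀ (R : List Int) (b r : Nat),
    R.foldl (fun (a : Nat) i =>
        KEYWORD_TABLE.foldl (fun (a : Nat) e => if pvStartsAt t i e.1 then min a e.2.1 else a) a) b ≤ r ↔
      b ≤ r ∨ ∃ i ∈ R, ∃ e ∈ KEYWORD_TABLE, pvStartsAt t i e.1 = true ∧ e.2.1 ≤ r := by
  intro R
  induction R with
  | nil => simp
  | cons i R ih =>
    intro b r
    simp only [List.foldl_cons]
    rw [ih, pv_inner_le]
    constructor
    · rintro (h | h)
      · rcases h with h | ⟨e, he, hp, hr⟩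
        · exact Or.inl h
        · exact Or.inr ⟨i, List.mem_cons_self .., e, he, hp, hr⟩
      · rcases h with ⟨j, hj, e, he, hp, hr⟩
        exact Or.inr ⟨j, List.mem_cons_of_mem _ hj, e, he, hp, hr⟩
    · rintro (h | ⟨j, hj, e, he, hp, hr⟩)
      · exact Or.inl (Or.inl h)
      · rcases List.mem_cons.mp hj with rfl | hj
        · exact Or.inl (Or.inr ⟨e, he, hp, hr⟩)
        · exact Or.inr ⟨j, hj, e, he, hp, hr⟩

-- a keyword matched at some scanned position ⇔ it is an infix of the text
theorem pv_kw_iff (t : List Char) (kw : String) (hkw : kw.toList ≠ []) :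
    (∃ i ∈ PySem.List.pyRange 0 (t.length : Int) 1, pvStartsAt t i kw = true) ↔
      PySem.Chars.isIn kw.toList t = true := by
  rw [← PySem.Chars.exists_prefix_drop_iff_isIn]
  constructor
  · rintro ⟨i, _, h⟩
    exact ⟨i.toNat, List.isPrefixOf_iff_prefix.mp h⟩
  · rintro ⟨j, hj⟩
    have hjlen : j < t.length := by
      by_contra h
      have : t.drop j = [] := List.drop_eq_nil_of_le (by omega)
      rw [this] at hj
      exact hkw (List.prefix_nil.mp hj)
    refine ⟨(j : Int), ?_, ?_⟩
    · rw [PySem.List.mem_pyRange_one]; constructor <;> [exact Int.natCast_nonneg j; exact_mod_cast hjlen]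
    · simp only [pvStartsAt, Int.toNat_natCast]
      exact List.isPrefixOf_iff_prefix.mpr hj

-- lift the pair-state double fold to the numeric one through pvC
theorem pv_outer_pair (t : List Char) :
    ∀ (R : List Int) (b : Nat), b ≤ 3 →
    R.foldl (fun (a : Nat × String) i =>
        KEYWORD_TABLE.foldl (fun (a : Nat × String) e =>
          if e.2.1 < a.1 ∧ pvStartsAt t i e.1 = true then (e.2.1, e.2.2) else a) a) (pvC b)
      = pvC (R.foldl (fun (a : Nat) i =>
          KEYWORD_TABLE.foldl (fun (a : Nat) e =>
            if pvStartsAt t i e.1 then min a e.2.1 else a) a) b) := by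
  intro R
  induction R with
  | nil => intro b _; rfl
  | cons i R ih =>
    intro b hb
    simp only [List.foldl_cons]
    rw [pv_pair_fold (fun e => pvStartsAt t i e.1) KEYWORD_TABLE (by decide) b hb]
    exact ih _ ((pv_inner_le (fun e => pvStartsAt t i e.1) KEYWORD_TABLE b 3).mpr (Or.inl hb))

-- the numeric fold's value, characterised by category hits
theorem pv_N_le (t : List Char) (r : Nat) :
    (PySem.List.pyRange 0 (t.length : Int) 1).foldl
        (fun (a : Nat) i => KEYWORD_TABLE.foldl (fun (a : Nat) e =>
          if pvStartsAt t i e.1 then min a e.2.1 else a) a) 3 ≤ r ↔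
      3 ≤ r ∨ ∃ e ∈ KEYWORD_TABLE, PySem.Chars.isIn e.1.toList t = true ∧ e.2.1 ≤ r := by
  rw [pv_outer_le]
  have hne : ∀ e ∈ KEYWORD_TABLE, e.1.toList ≠ [] := by decide
  constructor
  · rintro (h | ⟨i, hi, e, he, hp, hr⟩)
    · exact Or.inl h
    · exact Or.inr ⟨e, he, (pv_kw_iff t e.1 (hne e he)).mp ⟨i, hi, hp⟩, hr⟩
  · rintro (h | ⟨e, he, hin, hr⟩)
    · exact Or.inl h
    · rcases (pv_kw_iff t e.1 (hne e he)).mpr hin with ⟨i, hi, hp⟩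
      exact Or.inr ⟨i, hi, e, he, hp, hr⟩

-- ===== VERDICT (by name: the statement is the Claim_ definition above) =====
theorem select_optimal_celebrity_spec : Claim_equal_select_optimal_celebrity := by
  intro u _
  show select_optimal_celebrity u = select_optimal_celebrity_alt u
  unfold select_optimal_celebrity select_optimal_celebrity_alt
  simp only [PySem.Str.isIn_eq, PySem.Str.toList_lower]
  generalize PySem.Chars.lower u.toList = t
  rw [show ((3 : Nat), ("peter" : String)) = pvC 3 from rfl,
      pv_outer_pair t _ 3 (by omega)]
  set N := (PySem.List.pyRange 0 (t.length : Int) 1).foldl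
      (fun (a : Nat) i => KEYWORD_TABLE.foldl (fun (a : Nat) e =>
        if pvStartsAt t i e.1 then min a e.2.1 else a) a) 3 with hN
  have H := fun r => hN ▸ pv_N_le t r
  have hN3 : N ≤ 3 := (H 3).mpr (Or.inl le_rfl)
  have hyes : ∀ r : Nat, (∃ e ∈ KEYWORD_TABLE, PySem.Chars.isIn e.1.toList t = true ∧ e.2.1 ≤ r) → N ≤ r :=
    fun r h => (H r).mpr (Or.inr h)
  have hnot : ∀ r : Nat, r < 3 →
      (∀ e ∈ KEYWORD_TABLE, e.2.1 ≤ r → PySem.Chars.isIn e.1.toList t = false) → ¬ N ≤ r := by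
    intro r h3 hall h
    rcases (H r).mp h with h' | ⟨e, he, hin, hr⟩
    · omega
    · rw [hall e he hr] at hin; exact Bool.false_ne_true hin
  by_cases c0 : (["stress", "anxious", "worried", "overwhelm"].any fun word => PySem.Chars.isIn word.toList t) = true
  · rw [if_pos c0]
    have hle : N ≤ 0 := by
      simp only [List.any_cons, List.any_nil, Bool.or_eq_true, Bool.or_false] at c0
      rcases c0 with h | h | h | h
      · exact hyes 0 ⟨("stress", 0, "david"), by decide, h, by decide⟩
      · exact hyes 0 ⟨("anxious", 0, "david"), by decide, h, by decide⟩
      · exact hyes 0 ⟨("worried", 0, "david"), by decide, h, by decide⟩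
      · exact hyes 0 ⟨("overwhelm", 0, "david"), by decide, h, by decide⟩
    have : N = 0 := by omega
    rw [this]; rfl
  · rw [if_neg c0]
    simp only [List.any_cons, List.any_nil, Bool.or_eq_true, Bool.or_false, not_or,
      Bool.not_eq_true] at c0
    obtain ⟨cs, ca, cw, co⟩ := c0
    by_cases c1 : (["sad", "lonely", "grief", "confused"].any fun word => PySem.Chars.isIn word.toList t) = true
    · rw [if_pos c1]
      have hle : N ≤ 1 := by
        simp only [List.any_cons, List.any_nil, Bool.or_eq_true, Bool.or_false] at c1
        rcases c1 with h | h | h | h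
        · exact hyes 1 ⟨("sad", 1, "morgan"), by decide, h, by decide⟩
        · exact hyes 1 ⟨("lonely", 1, "morgan"), by decide, h, by decide⟩
        · exact hyes 1 ⟨("grief", 1, "morgan"), by decide, h, by decide⟩
        · exact hyes 1 ⟨("confused", 1, "morgan"), by decide, h, by decide⟩
      have hgt : ¬ N ≤ 0 := by
        refine hnot 0 (by omega) ?_
        intro e he hr
        simp only [KEYWORD_TABLE, List.mem_cons, List.not_mem_nil, or_false] at he
        rcases he with rfl | rfl | rfl | rfl | rfl | rfl | rfl | rfl | rfl | rfl | rfl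
        · exact cs
        · exact ca
        · exact cw
        · exact co
        all_goals exact absurd hr (by decide)
      have : N = 1 := by omega
      rw [this]; rfl
    · rw [if_neg c1]
      simp only [List.any_cons, List.any_nil, Bool.or_eq_true, Bool.or_false, not_or,
        Bool.not_eq_true] at c1
      obtain ⟨cd, cl, cg, cc⟩ := c1
      by_cases c2 : (["angry", "frustrated", "relationship"].any fun word => PySem.Chars.isIn word.toList t) = true
      · rw [if_pos c2]
        have hle : N ≤ 2 := by
          simp only [List.any_cons, List.any_nil, Bool.or_eq_true, Bool.or_false] at c2
          rcases c2 with h | h | h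
          · exact hyes 2 ⟨("angry", 2, "scarlett"), by decide, h, by decide⟩
          · exact hyes 2 ⟨("frustrated", 2, "scarlett"), by decide, h, by decide⟩
          · exact hyes 2 ⟨("relationship", 2, "scarlett"), by decide, h, by decide⟩
        have hgt : ¬ N ≤ 1 := by
          refine hnot 1 (by omega) ?_
          intro e he hr
          simp only [KEYWORD_TABLE, List.mem_cons, List.not_mem_nil, or_false] at he
          rcases he with rfl | rfl | rfl | rfl | rfl | rfl | rfl | rfl | rfl | rfl | rfl
          · exact cs
          · exact ca
          · exact cw
          · exact co
          · exact cd
          · exact cl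
          · exact cg
          · exact cc
          all_goals exact absurd hr (by decide)
        have : N = 2 := by omega
        rw [this]; rfl
      · rw [if_neg c2]
        simp only [List.any_cons, List.any_nil, Bool.or_eq_true, Bool.or_false, not_or,
          Bool.not_eq_true] at c2
        obtain ⟨cy, cf, cr⟩ := c2
        have hgt : ¬ N ≤ 2 := by
          refine hnot 2 (by omega) ?_
          intro e he _
          simp only [KEYWORD_TABLE, List.mem_cons, List.not_mem_nil, or_false] at he
          rcases he with rfl | rfl | rfl | rfl | rfl | rfl | rfl | rfl | rfl | rfl | rfl
          · exact cs
          · exact ca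
          · exact cw
          · exact co
          · exact cd
          · exact cl
          · exact cg
          · exact cc
          · exact cy
          · exact cf
          · exact cr
        have : N = 3 := by omega
        rw [this]; rfl
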